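-- pv_equiv track=rewrite | github.com/pwwang/liquidpy | liquid/utils.py | analyze_leading_spaces
-- ===== SOURCE A (Python) =====
-- def analyze_leading_spaces(string):
--     # type: (str) -> Tuple[int, int]
--     """Analyze the leading spaces of a string
--
--     Args:
--         string: The string to analyze
--
--     Returns:
--         A tuple of two integers. Number of new lines and the number spaces
--         that last new line has
--     """
--     newline = 0
--     last_nspaces = 0
--     for char in string:
--         if not char.isspace():
--             break
--         if char == '\n':
--             newline += 1
--             last_nspaces = 0
--         last_nspaces += 1
--     return newline, last_nspaces
-- ===== SOURCE B (Python) =====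
-- def analyze_leading_spaces(string):
--     # type: (str) -> "Tuple[int, int]"
--     """Leading-whitespace analysis: prefix pass + count + backward scan."""
--     i = 0
--     while i < len(string) and string[i].isspace():
--         i += 1
--     prefix = string[:i]
--     newline = prefix.count('\n')
--     if newline == 0:
--         return 0, len(prefix)
--     j = len(prefix)
--     while j > 0 and prefix[j - 1] != '\n':
--         j -= 1
--     # j - 1 is the index of the last newline; A counts from it inclusively
--     return newline, len(prefix) - j + 1
-- ===== Notes on version B (the rewrite author's own statement) =====
-- stated objective: alternative
-- what changed: A's single accumulating loop with two running counters is replaced by extracting the whitespace prefix, counting its newlines with str.count, and a backward scan locating the last newline (reproducing A's rule that the count after the last newline includes the newline itself).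
import Mathlib
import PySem

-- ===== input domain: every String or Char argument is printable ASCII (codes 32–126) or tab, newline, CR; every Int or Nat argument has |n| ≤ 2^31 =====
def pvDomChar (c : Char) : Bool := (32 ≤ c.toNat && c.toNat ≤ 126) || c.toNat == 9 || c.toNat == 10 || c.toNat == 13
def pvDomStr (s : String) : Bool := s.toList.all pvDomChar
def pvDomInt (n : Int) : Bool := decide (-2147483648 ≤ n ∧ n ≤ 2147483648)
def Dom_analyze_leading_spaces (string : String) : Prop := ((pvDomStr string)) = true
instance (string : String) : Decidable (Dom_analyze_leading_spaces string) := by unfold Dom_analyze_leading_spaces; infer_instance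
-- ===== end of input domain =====

-- B replaces A's single accumulating loop by a prefix extraction, a newline count, and a
-- backward scan for the last newline (objective: alternative decomposition; same cost).

-- ===== PORT A =====
-- the 'for char in string' loop with its break and two accumulators
def pvLoopA : List Char → Int → Int → Int × Int
  | [], newline, last_nspaces => (newline, last_nspaces)
  | char :: rest, newline, last_nspaces =>
    if !(PySem.Chars.isspace char) then (newline, last_nspaces)
    else if char = '\n' then pvLoopA rest (newline + 1) (0 + 1)
    else pvLoopA rest newline (last_nspaces + 1)

def analyze_leading_spaces (string : String) : Int × Int :=
  pvLoopA string.toList 0 0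

-- ===== PORT B =====
-- Source B's first while loop: the number of steps i makes (leading isspace chars)
def pvWsLen : List Char → Nat
  | [] => 0
  | c :: rest => if PySem.Chars.isspace c then pvWsLen rest + 1 else 0

-- Source B's backward while loop, run on the reversed prefix: steps j makes before hitting '\n'
def pvNonNl : List Char → Nat
  | [] => 0
  | c :: rest => if c != '\n' then pvNonNl rest + 1 else 0

def analyze_leading_spaces_alt (string : String) : Int × Int :=
  let cs := string.toList
  let pre := cs.take (pvWsLen cs)             -- prefix = string[:i]
  let newline := pre.count '\n'               -- prefix.count('\n'); exact for a 1-char substring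
  if newline = 0 then (0, (pre.length : Int))
  else
    let j : Nat := pre.length - pvNonNl pre.reverse   -- final value of j
    ((newline : Int), (pre.length : Int) - (j : Int) + 1)

-- ===== PRECONDITION & SPEC =====
def Spec_analyze_leading_spaces (string : String) (out : Int × Int) : Prop := out = analyze_leading_spaces_alt string
instance (string : String) (out : Int × Int) : Decidable (Spec_analyze_leading_spaces string out) := by unfold Spec_analyze_leading_spaces; infer_instance

-- ===== CLAIM (what is proved, stated in full; the proofs are below) =====
def Claim_equal_analyze_leading_spaces : Prop := ∀ (string : String), Dom_analyze_leading_spaces string → Spec_analyze_leading_spaces string (analyze_leading_spaces string)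

-- ===== LEMMAS AND PROOFS =====

lemma pvWsLen_take (cs : List Char) :
    cs.take (pvWsLen cs) = cs.takeWhile (fun c => PySem.Chars.isspace c) := by
  induction cs with
  | nil => rfl
  | cons c rest ih =>
    by_cases h : PySem.Chars.isspace c = true <;> simp [pvWsLen, h, ih]

lemma pvNonNl_eq (l : List Char) :
    pvNonNl l = (l.takeWhile (fun c => c != '\n')).length := by
  induction l with
  | nil => rfl
  | cons c rest ih =>
    by_cases h : (c != '\n') = true <;> simp [pvNonNl, h, ih]

lemma tw_append_of_mem (l : List Char) (c : Char) (h : '\n' ∈ l) :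
    (l ++ [c]).takeWhile (fun x => x != '\n') = l.takeWhile (fun x => x != '\n') := by
  induction l with
  | nil => simp at h
  | cons a l ih =>
    by_cases ha : a = '\n'
    · subst ha; simp
    · have h' : '\n' ∈ l := by
        rcases List.mem_cons.mp h with h1 | h1
        · exact absurd h1.symm ha
        · exact h1
      simp [ha, ih h']

lemma tw_append_nl_of_not_mem (l : List Char) (h : '\n' ∉ l) :
    (l ++ ['\n']).takeWhile (fun x => x != '\n') = l := by
  induction l with
  | nil => simp
  | cons a l ih =>
    have ha : a ≠ '\n' := fun hc => h (hc ▸ List.mem_cons_self)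
    simp [ha, ih (fun hc => h (List.mem_cons_of_mem _ hc))]

lemma pvLoopA_eq (cs : List Char) : ∀ nl ns : Int,
    pvLoopA cs nl ns =
      (nl + (((cs.takeWhile (fun c => PySem.Chars.isspace c)).count '\n' : Nat) : Int),
       if (cs.takeWhile (fun c => PySem.Chars.isspace c)).count '\n' = 0
       then ns + ((cs.takeWhile (fun c => PySem.Chars.isspace c)).length : Int)
       else ((((cs.takeWhile (fun c => PySem.Chars.isspace c)).reverse.takeWhile
               (fun c => c != '\n')).length : Nat) + 1 : Int)) := by
  induction cs with
  | nil => intro nl ns; simp [pvLoopA]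
  | cons c rest ih =>
    intro nl ns
    by_cases hsp : PySem.Chars.isspace c = true
    · simp only [List.takeWhile_cons, hsp, if_true]
      generalize hq : rest.takeWhile (fun c => PySem.Chars.isspace c) = q at ih
      by_cases hnlc : c = '\n'
      · subst hnlc
        rw [show pvLoopA ('\n' :: rest) nl ns = pvLoopA rest (nl + 1) (0 + 1) by
              simp [pvLoopA, hsp], ih]
        by_cases h0 : q.count '\n' = 0
        · have hmem' : '\n' ∉ q.reverse := by
            simpa [List.count_eq_zero] using h0
          simp only [h0, if_true, List.count_cons_self, List.reverse_cons]
          rw [tw_append_nl_of_not_mem _ hmem']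
          refine Prod.ext ?_ ?_ <;> simp <;> omega
        · have hmem' : '\n' ∈ q.reverse := by
            simpa using (by by_contra hc; exact h0 (List.count_eq_zero.mpr hc) : '\n' ∈ q)
          simp only [h0, if_false, List.count_cons_self, List.reverse_cons]
          rw [tw_append_of_mem _ _ hmem']
          refine Prod.ext ?_ ?_ <;> simp <;> omega
      · rw [show pvLoopA (c :: rest) nl ns = pvLoopA rest nl (ns + 1) by
              simp [pvLoopA, hsp, hnlc], ih]
        have hcount : (c :: q).count '\n' = q.count '\n' := by
          simp [hnlc]
        rw [hcount]
        by_cases h0 : q.count '\n' = 0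
        · simp only [h0, if_true]
          refine Prod.ext ?_ ?_ <;> simp <;> omega
        · have hmem' : '\n' ∈ q.reverse := by
            simpa using (by by_contra hc; exact h0 (List.count_eq_zero.mpr hc) : '\n' ∈ q)
          simp only [h0, if_false, List.reverse_cons]
          rw [tw_append_of_mem _ _ hmem']
    · have hstop : pvLoopA (c :: rest) nl ns = (nl, ns) := by simp [pvLoopA, hsp]
      rw [hstop]
      simp [hsp]

-- ===== VERDICT (by name: the statement is the Claim_ definition above) =====
theorem analyze_leading_spaces_spec : Claim_equal_analyze_leading_spaces := by
  intro s _
  unfold Spec_analyze_leading_spaces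
  simp only [analyze_leading_spaces, analyze_leading_spaces_alt]
  rw [pvWsLen_take, pvLoopA_eq]
  generalize s.toList.takeWhile (fun c => PySem.Chars.isspace c) = p
  by_cases h0 : p.count '\n' = 0
  · simp [h0]
  · have hle : (p.reverse.takeWhile (fun c => c != '\n')).length ≤ p.length := by
      calc (p.reverse.takeWhile (fun c => c != '\n')).length ≤ p.reverse.length := by
            simpa using List.IsPrefix.length_le (List.takeWhile_prefix _ (l := p.reverse))
        _ = p.length := List.length_reverse
    simp only [h0, pvNonNl_eq]
    refine Prod.ext (by simp) ?_
    simp only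
    push_cast [Nat.cast_sub hle]
    ring
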